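-- pv_equiv track=rewrite | github.com/jbayardo/algo3-tp2 | generate.py | _tree_edges
-- ===== SOURCE A (Python) =====
-- def _tree_edges(n):
--     # generador de arbol binario balanceado
--     nodes = iter(range(n))
--     parents = [next(nodes)]
--     while parents:
--         source = parents.pop(0)
--         for i in range(2):
--             try:
--                 target = next(nodes)
--                 parents.append(target)
--                 yield source, target
--             except StopIteration:
--                 break
-- ===== SOURCE B (Python) =====
-- def _tree_edges(n):
--     # closed form: node i (1 <= i < n) hangs off parent (i - 1) // 2
--     for i in range(1, n):
--         yield (i - 1) // 2, i
-- ===== Notes on version B (the rewrite author's own statement) =====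
-- stated objective: faster
-- what changed: Replaces the BFS queue simulation (with O(n) pops from the front of a list) by the closed-form parent formula (i-1)//2 for each node i in range(1, n).
-- outside the precondition, e.g. on _tree_edges(0): A raises RuntimeError, B returns []
import Mathlib
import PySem

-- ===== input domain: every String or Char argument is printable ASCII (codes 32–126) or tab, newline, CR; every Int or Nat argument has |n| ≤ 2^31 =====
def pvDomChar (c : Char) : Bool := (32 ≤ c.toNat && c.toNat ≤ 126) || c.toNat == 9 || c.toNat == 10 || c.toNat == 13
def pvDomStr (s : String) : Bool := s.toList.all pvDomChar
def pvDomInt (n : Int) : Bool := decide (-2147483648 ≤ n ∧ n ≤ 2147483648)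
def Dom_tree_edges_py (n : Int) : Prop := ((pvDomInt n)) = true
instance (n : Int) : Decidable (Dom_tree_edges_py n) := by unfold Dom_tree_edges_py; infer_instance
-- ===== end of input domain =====

-- ===== PORT A =====
-- B replaces A's O(n^2) BFS queue simulation by the closed-form parent formula (i-1)//2; faster (asymptotic).
-- A raises RuntimeError for n <= 0 (StopIteration inside a generator); Pre_ excludes those, B returns [].

-- One iteration of A's `while parents` loop pops `source` and tries up to two `next(nodes)`:
-- `nxt` is the next unconsumed value of `iter(range(n))`; edges are accumulated in reverse.
def treeEdgesLoopA (n : Int) : Nat → Int → List Int → List (Int × Int) → List (Int × Int)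
  | 0, _, _, acc => acc.reverse
  | _ + 1, _, [], acc => acc.reverse
  | fuel + 1, nxt, source :: rest, acc =>
    if nxt < n then
      if nxt + 1 < n then
        treeEdgesLoopA n fuel (nxt + 2) (rest ++ [nxt, nxt + 1])
          ((source, nxt + 1) :: (source, nxt) :: acc)
      else
        treeEdgesLoopA n fuel (nxt + 1) (rest ++ [nxt]) ((source, nxt) :: acc)
    else
      treeEdgesLoopA n fuel nxt rest acc

-- `parents = [next(nodes)]` consumes 0; the loop runs at most n iterations (each pop removes a
-- node of range(n) that entered the queue exactly once), so fuel n.toNat is exact.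
def tree_edges_py (n : Int) : List (Int × Int) :=
  treeEdgesLoopA n n.toNat 1 [0] []

-- ===== PORT B =====
def tree_edges_py_alt (n : Int) : List (Int × Int) :=
  (PySem.List.pyRange 1 n 1).map (fun i => (PySem.Int.floordiv (i - 1) 2, i))

-- ===== PRECONDITION & SPEC =====
-- Pre_ excludes exactly n <= 0, where A raises RuntimeError (the initial next() on an empty
-- iterator raises StopIteration inside the generator, PEP 479) and returns no value.
def Pre_tree_edges_py (n : Int) : Prop := 1 ≤ n
instance (n : Int) : Decidable (Pre_tree_edges_py n) := by unfold Pre_tree_edges_py; infer_instance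
def pvWitness_tree_edges_py : Int := 5

def Spec_tree_edges_py (n : Int) (out : List (Int × Int)) : Prop := out = tree_edges_py_alt n
instance (n : Int) (out : List (Int × Int)) : Decidable (Spec_tree_edges_py n out) := by unfold Spec_tree_edges_py; infer_instance

-- ===== CLAIM (what is proved, stated in full; the proofs are below) =====
def Claim_equal_tree_edges_py : Prop := ∀ (n : Int), Dom_tree_edges_py n → Pre_tree_edges_py n → Spec_tree_edges_py n (tree_edges_py n)

-- ===== LEMMAS AND PROOFS =====

-- Loop invariant: at the top of an iteration with next pop `s`, the consumed-prefix pointer is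
-- nxt = min (2*s+1) n, the queue is range(s, nxt), and acc holds (reversed) the edges of
-- targets 1..nxt-1; the remaining output is the edges of targets nxt..n-1.
lemma treeEdgesLoopA_inv (n : Int) (hn : 1 ≤ n) :
    ∀ (fuel : Nat) (s : Int) (acc : List (Int × Int)), 0 ≤ s → (n - s).toNat ≤ fuel →
      treeEdgesLoopA n fuel (min (2 * s + 1) n) (PySem.List.pyRange s (min (2 * s + 1) n) 1) acc
        = acc.reverse ++ (PySem.List.pyRange (min (2 * s + 1) n) n 1).map
            (fun i => (PySem.Int.floordiv (i - 1) 2, i)) := by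
  intro fuel
  induction fuel with
  | zero =>
    intro s acc hs hf
    have hmin : min (2 * s + 1) n = n := by omega
    rw [hmin, PySem.List.pyRange_one_eq_nil (by omega), PySem.List.pyRange_one_eq_nil le_rfl]
    simp [treeEdgesLoopA]
  | succ fuel ih =>
    intro s acc hs hf
    by_cases hsn : n ≤ s
    · have hmin : min (2 * s + 1) n = n := by omega
      rw [hmin, PySem.List.pyRange_one_eq_nil hsn, PySem.List.pyRange_one_eq_nil le_rfl]
      simp [treeEdgesLoopA]
    · -- s < n: the queue is nonempty with head s
      have hlt : s < min (2 * s + 1) n := by omega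
      rw [PySem.List.pyRange_one_cons hlt]
      by_cases h1 : min (2 * s + 1) n < n
      · have hmin : min (2 * s + 1) n = 2 * s + 1 := by omega
        rw [hmin] at h1 ⊢
        by_cases h2 : 2 * s + 1 + 1 < n
        · -- both children exist
          have key := ih (s + 1) ((s, 2 * s + 1 + 1) :: (s, 2 * s + 1) :: acc) (by omega) (by omega)
          have hm : min (2 * (s + 1) + 1) n = 2 * s + 1 + 1 + 1 := by omega
          rw [hm] at key
          have hsnoc1 : PySem.List.pyRange (s + 1) (2 * s + 1) 1 ++ [2 * s + 1]
              = PySem.List.pyRange (s + 1) (2 * s + 1 + 1) 1 :=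
            (PySem.List.pyRange_one_succ_right (by omega)).symm
          have hsnoc2 : PySem.List.pyRange (s + 1) (2 * s + 1 + 1) 1 ++ [2 * s + 1 + 1]
              = PySem.List.pyRange (s + 1) (2 * s + 1 + 1 + 1) 1 :=
            (PySem.List.pyRange_one_succ_right (by omega)).symm
          have hq : PySem.List.pyRange (s + 1) (2 * s + 1) 1 ++ [2 * s + 1, 2 * s + 1 + 1]
              = PySem.List.pyRange (s + 1) (2 * s + 1 + 1 + 1) 1 := by
            rw [show ([2 * s + 1, 2 * s + 1 + 1] : List Int)
                  = [2 * s + 1] ++ [2 * s + 1 + 1] from rfl,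
              ← List.append_assoc, hsnoc1, hsnoc2]
          have hsplit : PySem.List.pyRange (2 * s + 1) n 1
              = PySem.List.pyRange (2 * s + 1) (2 * s + 1 + 1 + 1) 1
                ++ PySem.List.pyRange (2 * s + 1 + 1 + 1) n 1 :=
            PySem.List.pyRange_one_append _ _ _ (by omega) (by omega)
          have htwo : PySem.List.pyRange (2 * s + 1) (2 * s + 1 + 1 + 1) 1
              = [2 * s + 1, 2 * s + 1 + 1] := by
            rw [PySem.List.pyRange_one_cons (by omega), PySem.List.pyRange_one_cons (by omega),
              PySem.List.pyRange_one_eq_nil le_rfl]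
          simp only [treeEdgesLoopA, if_pos h1, if_pos h2,
            show (2 * s + 1 + 2 : Int) = 2 * s + 1 + 1 + 1 by ring]
          rw [hq, key, hsplit, htwo]
          simp
          omega
        · -- only the left child: n = 2*s+2
          have key := ih (s + 1) ((s, 2 * s + 1) :: acc) (by omega) (by omega)
          have hm : min (2 * (s + 1) + 1) n = 2 * s + 1 + 1 := by omega
          rw [hm] at key
          have hsnoc1 : PySem.List.pyRange (s + 1) (2 * s + 1) 1 ++ [2 * s + 1]
              = PySem.List.pyRange (s + 1) (2 * s + 1 + 1) 1 :=
            (PySem.List.pyRange_one_succ_right (by omega)).symm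
          have hone : PySem.List.pyRange (2 * s + 1) n 1 = [2 * s + 1] := by
            rw [PySem.List.pyRange_one_cons (by omega),
              PySem.List.pyRange_one_eq_nil (by omega)]
          simp only [treeEdgesLoopA, if_pos h1, if_neg h2]
          rw [hsnoc1, key, hone, PySem.List.pyRange_one_eq_nil (by omega)]
          simp
      · -- nodes exhausted: nxt = n, the pop appends and yields nothing
        have hmin : min (2 * s + 1) n = n := by omega
        have key := ih (s + 1) acc (by omega) (by omega)
        have hm : min (2 * (s + 1) + 1) n = n := by omega
        rw [hm] at key
        rw [hmin] at h1 ⊢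
        simp only [treeEdgesLoopA, if_neg h1]
        exact key

-- ===== VERDICT (by name: the statement is the Claim_ definition above) =====
theorem tree_edges_py_spec : Claim_equal_tree_edges_py := by
  intro n _ hpre
  unfold Spec_tree_edges_py tree_edges_py tree_edges_py_alt
  have hpre' : (1 : Int) ≤ n := hpre
  have h := treeEdgesLoopA_inv n hpre' n.toNat 0 [] le_rfl (by omega)
  rw [show min (2 * (0 : Int) + 1) n = 1 by omega] at h
  simpa [PySem.List.pyRange_one_cons (show (0 : Int) < 1 by omega),
    PySem.List.pyRange_one_eq_nil (le_refl (1 : Int))] using h
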